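-- pv_equiv track=rewrite | github.com/miliar/Code_Jam_Webscraper | Solutions_in_python/Problem_43/AllBase.py | getMinBase
-- ===== SOURCE A (Python) =====
-- def getMinBase(number):
-- 	base =set()
-- 	for i in number:
-- 		base.add(i)
-- 	if len(base)!=1:
-- 		return len(base)
-- 	else:
-- 		return 2
-- ===== SOURCE B (Python) =====
-- def getMinBase(number):
--     chars = sorted(number)
--     count = 0
--     prev = None
--     for c in chars:
--         if prev is None or c != prev:
--             count += 1
--         prev = c
--     if count == 1:
--         return 2
--     return count
-- ===== Notes on version B (the rewrite author's own statement) =====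
-- stated objective: alternative
-- what changed: Replaces the set accumulation with sorting the characters and counting run boundaries in one linear scan over the sorted list.
import Mathlib
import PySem

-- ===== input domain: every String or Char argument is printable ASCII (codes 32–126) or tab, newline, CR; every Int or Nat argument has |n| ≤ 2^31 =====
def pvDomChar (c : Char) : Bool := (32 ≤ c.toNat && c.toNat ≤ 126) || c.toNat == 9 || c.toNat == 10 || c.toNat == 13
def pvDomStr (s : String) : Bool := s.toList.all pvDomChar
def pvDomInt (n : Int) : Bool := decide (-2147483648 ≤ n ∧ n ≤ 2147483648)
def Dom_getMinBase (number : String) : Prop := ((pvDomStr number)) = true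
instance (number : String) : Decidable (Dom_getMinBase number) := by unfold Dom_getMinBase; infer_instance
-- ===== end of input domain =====

-- B sorts the characters and counts run boundaries in one linear scan, instead of accumulating a set; alternative algorithm, same exact result.


-- ===== PORT A =====
-- base = set(); for i in number: base.add(i); return len(base) if len(base)!=1 else 2
def getMinBase (number : String) : Int :=
  let base : PySem.Set Char := number.toList.foldl (fun s i => PySem.Set.add s i) PySem.Set.empty
  if (base.length : Int) ≠ 1 then (base.length : Int) else 2

-- ===== PORT B =====
-- the linear scan over the sorted character list: count increments at the first
-- element and whenever the current character differs from the previous one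
def bScan : List Char → Nat → Option Char → Nat
  | [], count, _ => count
  | c :: rest, count, prev =>
    if prev = none ∨ prev ≠ some c then bScan rest (count + 1) (some c)
    else bScan rest count (some c)

def getMinBase_alt (number : String) : Int :=
  let count := bScan (PySem.List.sorted number.toList (fun c => c)) 0 none
  if count = 1 then 2 else (count : Int)

-- ===== PRECONDITION & SPEC =====
def Spec_getMinBase (number : String) (out : Int) : Prop := out = getMinBase_alt number
instance (number : String) (out : Int) : Decidable (Spec_getMinBase number out) := by unfold Spec_getMinBase; infer_instance

-- ===== CLAIM (what is proved, stated in full; the proofs are below) =====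
def Claim_equal_getMinBase : Prop := ∀ (number : String), Dom_getMinBase number → Spec_getMinBase number (getMinBase number)

-- ===== LEMMAS AND PROOFS =====

-- c is strictly below every element of ys, so discarding c changes nothing
theorem discard_of_not_mem {c : Char} {s : PySem.Set Char} (h : c ∉ s) :
    PySem.Set.discard s c = s := by
  simp only [PySem.Set.discard]
  apply List.filter_eq_self.mpr
  intro y hy
  simp only [ne_eq, Bool.not_eq_eq_eq_not, Bool.not_true, beq_eq_false_iff_ne]
  exact fun hyc => h (hyc ▸ hy)

-- the scan on a ≤-sorted list, having last seen c with c ≤ everything ahead,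
-- adds exactly the number of distinct elements ahead that differ from c
theorem bScan_sorted_some (ys : List Char) (h : ys.Pairwise (· ≤ ·))
    (c : Char) (hc : ∀ y ∈ ys, c ≤ y) (count : Nat) :
    bScan ys count (some c) = count + (PySem.Set.discard (PySem.Set.ofList ys) c).length := by
  induction ys generalizing c count with
  | nil => simp [bScan, PySem.Set.discard]
  | cons y rest ih =>
    have hpw := (List.pairwise_cons.mp h)
    have hrest : rest.Pairwise (· ≤ ·) := hpw.2
    have hyle : ∀ r ∈ rest, y ≤ r := hpw.1
    have hcy : c ≤ y := hc y (List.mem_cons_self)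
    rw [PySem.Set.ofList_cons]
    by_cases hcase : c = y
    · subst hcase
      simp only [bScan, ne_eq, reduceCtorEq, not_true_eq_false, or_self, if_false]
      rw [ih hrest c hyle count]
      congr 1
      simp only [PySem.Set.discard, List.filter_cons]
      simp [List.filter_filter]
    · have hcnotin : c ∉ rest := by
        intro hmem
        exact hcase (le_antisymm hcy (hyle c hmem))
      simp only [bScan, ne_eq, Option.some.injEq, reduceCtorEq, false_or]
      rw [if_pos (fun hyc => hcase hyc)]
      rw [ih hrest y hyle (count + 1)]
      have hsub : c ∉ PySem.Set.discard (PySem.Set.ofList rest) y := by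
        intro hmem
        have hc' := (List.mem_filter.mp hmem).1
        rw [PySem.Set.mem_ofList] at hc'
        exact hcnotin hc' 
      simp only [PySem.Set.discard, List.filter_cons]
      have hycne : (!y == c) = true := by simp [Ne.symm hcase]
      simp only [hycne, if_true]
      have : List.filter (fun z => !z == c) (List.filter (fun z => !z == y) (PySem.Set.ofList rest))
          = List.filter (fun z => !z == y) (PySem.Set.ofList rest) := by
        have := discard_of_not_mem (s := PySem.Set.discard (PySem.Set.ofList rest) y) hsub
        simpa [PySem.Set.discard] using this
      rw [this]
      simp only [List.length_cons]
      omega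

theorem bScan_sorted_none (ys : List Char) (h : ys.Pairwise (· ≤ ·)) :
    bScan ys 0 none = (PySem.Set.ofList ys).length := by
  cases ys with
  | nil => simp [bScan]
  | cons y rest =>
    have hpw := List.pairwise_cons.mp h
    simp only [bScan, reduceCtorEq, ne_eq, not_false_eq_true, true_or, if_true]
    rw [bScan_sorted_some rest hpw.2 y hpw.1 1, PySem.Set.ofList_cons]
    simp only [PySem.Set.discard, List.length_cons]
    omega

-- sets of permuted lists have equal length
theorem length_ofList_perm {xs ys : List Char} (h : xs.Perm ys) :
    (PySem.Set.ofList xs).length = (PySem.Set.ofList ys).length := by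
  have hperm : (PySem.Set.ofList xs).Perm (PySem.Set.ofList ys) := by
    rw [List.perm_ext_iff_of_nodup (PySem.Set.nodup_ofList _) (PySem.Set.nodup_ofList _)]
    intro a
    rw [PySem.Set.mem_ofList, PySem.Set.mem_ofList]
    exact h.mem_iff
  exact hperm.length_eq

theorem bScan_eq_setLen (xs : List Char) :
    bScan (PySem.List.sorted xs (fun c => c)) 0 none = (PySem.Set.ofList xs).length := by
  rw [bScan_sorted_none _ (PySem.List.sorted_pairwise xs (fun c => c))]
  exact length_ofList_perm (PySem.List.sorted_perm xs (fun c => c) false)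

-- ===== VERDICT (by name: the statement is the Claim_ definition above) =====
theorem getMinBase_spec : Claim_equal_getMinBase := by
  intro number _
  have key : (number.toList.foldl (fun s i => PySem.Set.add s i) PySem.Set.empty).length
      = bScan (PySem.List.sorted number.toList (fun c => c)) 0 none := by
    rw [bScan_eq_setLen]
    rfl
  unfold Spec_getMinBase getMinBase getMinBase_alt
  simp only [key]
  set n := bScan (PySem.List.sorted number.toList (fun c => c)) 0 none with hn
  by_cases h1 : n = 1
  · simp [h1]
  · have : (n : Int) ≠ 1 := by exact_mod_cast h1
    simp [h1, this]
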